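-- pv_equiv track=rewrite | github.com/mctools/ncrystal | ncrystal_python/src/NCrystal/_common.py | _classifySG
-- ===== SOURCE A (Python) =====
-- def _classifySG(sgno):
--     assert 1<=sgno<=230
--     ll=[(195,'cubic'),(168,'hexagonal'),(143,'trigonal'),
--         (75,'tetragonal'),(16,'orthorombic'),(3,'monoclinic'),(1,'triclinic')]
--     for thr,nme in ll:
--         if sgno>=thr:
--             return nme
--     assert False
-- ===== SOURCE B (Python) =====
-- import bisect
--
-- _SG_THRESHOLDS = [1, 3, 16, 75, 143, 168, 195]
-- _SG_NAMES = ['triclinic', 'monoclinic', 'orthorombic',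
--              'tetragonal', 'trigonal', 'hexagonal', 'cubic']
--
-- def _classifySG(sgno):
--     assert 1<=sgno<=230
--     return _SG_NAMES[bisect.bisect_right(_SG_THRESHOLDS, sgno) - 1]
-- ===== Notes on version B (the rewrite author's own statement) =====
-- stated objective: idiomatic
-- what changed: Replaced the descending linear first-match scan over (threshold,name) pairs by a binary search (bisect_right) over an ascending threshold table indexing a parallel names list.
import Mathlib
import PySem

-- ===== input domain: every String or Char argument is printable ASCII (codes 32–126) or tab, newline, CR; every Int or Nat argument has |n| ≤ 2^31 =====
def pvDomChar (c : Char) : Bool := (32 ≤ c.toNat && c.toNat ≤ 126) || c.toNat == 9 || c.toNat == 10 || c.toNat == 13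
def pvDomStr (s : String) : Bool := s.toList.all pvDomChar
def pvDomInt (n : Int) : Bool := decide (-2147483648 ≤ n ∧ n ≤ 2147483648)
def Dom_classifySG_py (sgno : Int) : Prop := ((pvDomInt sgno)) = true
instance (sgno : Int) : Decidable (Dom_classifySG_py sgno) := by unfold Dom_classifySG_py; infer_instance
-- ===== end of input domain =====

-- ===== PORT A =====
-- A: descending scan over (threshold, name) pairs, first match wins.
def classifySG_py_loop (sgno : Int) : List (Int × String) → String
  | [] => ""   -- unreachable for 1 ≤ sgno (A's trailing 'assert False')
  | (thr, nme) :: rest => if sgno ≥ thr then nme else classifySG_py_loop sgno rest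

def classifySG_py (sgno : Int) : String :=
  classifySG_py_loop sgno
    [(195,"cubic"),(168,"hexagonal"),(143,"trigonal"),
     (75,"tetragonal"),(16,"orthorombic"),(3,"monoclinic"),(1,"triclinic")]

-- ===== PORT B =====
-- B: bisect_right on the ascending threshold table, indexing a parallel names list.
def sgThresholds : List Int := [1, 3, 16, 75, 143, 168, 195]
def sgNames : List String :=
  ["triclinic", "monoclinic", "orthorombic", "tetragonal", "trigonal", "hexagonal", "cubic"]

def classifySG_py_alt (sgno : Int) : String :=
  sgNames.getD (PySem.List.bisectRight sgThresholds sgno - 1) ""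

-- ===== PRECONDITION & SPEC =====
-- Pre_ excludes exactly the inputs on which A's 'assert 1<=sgno<=230' raises AssertionError.
def Pre_classifySG_py (sgno : Int) : Prop := 1 ≤ sgno ∧ sgno ≤ 230
instance (sgno : Int) : Decidable (Pre_classifySG_py sgno) := by unfold Pre_classifySG_py; infer_instance
def pvWitness_classifySG_py : Int := (5)

def Spec_classifySG_py (sgno : Int) (out : String) : Prop := out = classifySG_py_alt sgno
instance (sgno : Int) (out : String) : Decidable (Spec_classifySG_py sgno out) := by unfold Spec_classifySG_py; infer_instance

-- ===== CLAIM (what is proved, stated in full; the proofs are below) =====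
def Claim_equal_classifySG_py : Prop := ∀ (sgno : Int), Dom_classifySG_py sgno → Pre_classifySG_py sgno → Spec_classifySG_py sgno (classifySG_py sgno)

-- ===== LEMMAS AND PROOFS =====

-- ===== VERDICT (by name: the statement is the Claim_ definition above) =====
theorem classifySG_py_spec : Claim_equal_classifySG_py := by
  intro sgno _ hpre
  obtain ⟨h1, h2⟩ := hpre
  unfold Spec_classifySG_py
  interval_cases sgno <;> decide
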